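-- pv_equiv track=rewrite | github.com/slne18/Multimeditron-pipeline | evaluation_accuracy/src/utils.py | redistribute_batches
-- ===== SOURCE A (Python) =====
-- from typing import List, Tuple, Iterable, Generic, TypeVar
-- import heapq
--
-- def redistribute_batches(all_elements: List, N: int) -> List[List]:
--     """
--     Args:
--         all_elements: List of elements to redistribute
--         N: Number of batches to redistribute the elements into
--     """
--
--     sorted_strings = sorted(all_elements, key=lambda x: len(x["input_ids"]), reverse=True)
--
--     new_batches = [[] for _ in range(N)]
--     heap = [(0, i) for i in range(N)]  # Each item is (current_batch_length, batch_index)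
--     heapq.heapify(heap)
--
--     # Assign each string to the batch with the minimum current total length
--     for s in sorted_strings:
--         current_length, idx = heapq.heappop(heap)
--         new_batches[idx].append(s)
--         heapq.heappush(heap, (current_length + len(s), idx))
--
--     return new_batches
-- ===== SOURCE B (Python) =====
-- def redistribute_batches(all_elements, N):
--     sorted_strings = sorted(all_elements, key=lambda x: len(x["input_ids"]), reverse=True)
--     new_batches = [[] for _ in range(N)]
--     loads = [0] * N
--     for s in sorted_strings:
--         idx = min(range(N), key=lambda i: loads[i])
--         new_batches[idx].append(s)
--         loads[idx] += len(s)
--     return new_batches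
-- ===== Notes on version B (the rewrite author's own statement) =====
-- stated objective: simpler
-- what changed: Replaces the binary heap of (load, index) pairs with a plain per-batch load array, picking the lightest batch each step by a linear min over the indices (first index wins ties, matching the heap's lexicographic tuple order).
import Mathlib
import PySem

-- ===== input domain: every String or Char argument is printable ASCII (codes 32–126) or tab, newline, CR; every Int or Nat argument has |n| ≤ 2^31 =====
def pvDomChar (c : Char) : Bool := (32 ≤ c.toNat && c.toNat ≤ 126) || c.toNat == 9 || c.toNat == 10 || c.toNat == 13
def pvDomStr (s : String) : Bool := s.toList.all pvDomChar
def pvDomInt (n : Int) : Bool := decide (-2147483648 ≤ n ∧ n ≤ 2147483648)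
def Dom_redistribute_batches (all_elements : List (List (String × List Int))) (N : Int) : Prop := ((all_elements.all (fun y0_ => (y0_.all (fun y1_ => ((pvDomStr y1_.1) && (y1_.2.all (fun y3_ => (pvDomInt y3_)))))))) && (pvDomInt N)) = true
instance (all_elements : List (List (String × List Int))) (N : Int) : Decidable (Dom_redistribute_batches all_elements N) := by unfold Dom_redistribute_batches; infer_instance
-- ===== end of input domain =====

-- B replaces A's binary heap of (load, index) pairs by a plain load list with a linear first-min scan
-- per element (same greedy LPT result, tie broken towards the smaller index in both); objective: simpler.


-- ===== PORT A =====
-- elements are Python dicts ported as association lists; x["input_ids"] is first-match lookup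
def pvKey (x : List (String × List Int)) : Int := ((List.lookup "input_ids" x).getD []).length

-- new_batches[idx].append(s)
def pvAppendAt {α : Type} : List (List α) → Nat → α → List (List α)
  | [], _, _ => []
  | b :: bs, 0, s => (b ++ [s]) :: bs
  | b :: bs, n+1, s => b :: pvAppendAt bs n s

-- new_batches[idx].append(s)

-- Python's '<' on the heap's (int, int) tuples: lexicographic
def pvLexLt (a b : Int × Int) : Bool := a.1 < b.1 || (a.1 == b.1 && a.2 < b.2)

-- the least tuple of m :: l
def pvHeapMin : (Int × Int) → List (Int × Int) → (Int × Int)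
  | m, [] => m
  | m, x :: xs => pvHeapMin (if pvLexLt x m then x else m) xs

-- heapify reorders but never changes the pair multiset; heappop returns the LEAST (load, idx) tuple and
-- removes it, heappush adds one pair — exact value-wise, modelled as min-extraction from the pair list.
def redistribute_batches (all_elements : List (List (String × List Int))) (N : Int) : List (List (List (String × List Int))) :=
  let sorted_strings := PySem.List.sorted all_elements pvKey true
  let init_batches : List (List (List (String × List Int))) := (PySem.List.pyRange 0 N 1).map (fun _ => [])
  let heap0 : List (Int × Int) := (PySem.List.pyRange 0 N 1).map (fun i => ((0 : Int), i))
  let st := sorted_strings.foldl (fun st s =>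
      match st.2 with
      | [] => st   -- Python: heappop raises IndexError here (N ≤ 0 with elements left); excluded by Pre_
      | x :: xs =>
        let m := pvHeapMin x xs
        (pvAppendAt st.1 m.2.toNat s, ((x :: xs).erase m) ++ [(m.1 + (s.length : Int), m.2)]))
    (init_batches, heap0)
  st.1

-- ===== PORT B =====
-- loads[i] (i always in range inside the loop)
def pvLoad (loads : List Int) (i : Int) : Int := (PySem.List.pyGet? loads i).getD 0

-- min(range(N), key=lambda i: loads[i]): running first-min fold
def pvMinIdx (loads : List Int) : Int → List Int → Int
  | b, [] => b
  | b, i :: is => pvMinIdx loads (if pvLoad loads i < pvLoad loads b then i else b) is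

def redistribute_batches_alt (all_elements : List (List (String × List Int))) (N : Int) : List (List (List (String × List Int))) :=
  let sorted_strings := PySem.List.sorted all_elements pvKey true
  let init_batches : List (List (List (String × List Int))) := (PySem.List.pyRange 0 N 1).map (fun _ => [])
  let loads0 : List Int := List.replicate N.toNat 0
  let st := sorted_strings.foldl (fun st s =>
      match PySem.List.pyRange 0 N 1 with
      | [] => st   -- Python: min() of an empty range raises ValueError (N ≤ 0 with elements left); excluded by Pre_
      | i :: is =>
        let idx := pvMinIdx st.2 i is
        (pvAppendAt st.1 idx.toNat s, st.2.set idx.toNat (pvLoad st.2 idx + (s.length : Int))))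
    (init_batches, loads0)
  st.1

-- ===== PRECONDITION & SPEC =====
-- Pre_ excludes: (i) N ≤ 0 with a nonempty input, where both Pythons raise (IndexError in A, ValueError in B);
-- (ii) elements without the "input_ids" key, where both raise KeyError; (iii) association lists with duplicate
-- keys, which no Python dict input can represent (a dict collapses them, so len(s) would not match the list).
def Pre_redistribute_batches (all_elements : List (List (String × List Int))) (N : Int) : Prop :=
  (all_elements = [] ∨ 1 ≤ N) ∧
  ∀ e ∈ all_elements, (e.map Prod.fst).Nodup ∧ (List.lookup "input_ids" e).isSome
instance (all_elements : List (List (String × List Int))) (N : Int) : Decidable (Pre_redistribute_batches all_elements N) := by unfold Pre_redistribute_batches; infer_instance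

def pvWitness_redistribute_batches : (List (List (String × List Int))) × Int :=
  ([[("input_ids", [1, 2])], [("input_ids", [3])]], 2)

def Spec_redistribute_batches (all_elements : List (List (String × List Int))) (N : Int) (out : List (List (List (String × List Int)))) : Prop := out = redistribute_batches_alt all_elements N
instance (all_elements : List (List (String × List Int))) (N : Int) (out : List (List (List (String × List Int)))) : Decidable (Spec_redistribute_batches all_elements N out) := by unfold Spec_redistribute_batches; infer_instance

-- ===== CLAIM (what is proved, stated in full; the proofs are below) =====
def Claim_equal_redistribute_batches : Prop := ∀ (all_elements : List (List (String × List Int))) (N : Int), Dom_redistribute_batches all_elements N → Pre_redistribute_batches all_elements N → Spec_redistribute_batches all_elements N (redistribute_batches all_elements N)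

-- ===== LEMMAS AND PROOFS =====

-- the heap's pair multiset, read off the load list: (loads[k], k) for each index k
def pvPairs (loads : List Int) : List (Int × Int) :=
  (PySem.List.enumerate loads).map (fun p => (p.2, p.1))

lemma pvLexLt_iff (a b : Int × Int) :
    pvLexLt a b = true ↔ (a.1 < b.1 ∨ (a.1 = b.1 ∧ a.2 < b.2)) := by
  simp [pvLexLt]

lemma pvHeapMin_isMin (l : List (Int × Int)) : ∀ m : Int × Int,
    pvHeapMin m l ∈ m :: l ∧ ∀ y ∈ m :: l, pvLexLt y (pvHeapMin m l) = false := by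
  induction l with
  | nil =>
    intro m
    refine ⟨by simp [pvHeapMin], ?_⟩
    intro y hy; simp at hy; subst hy
    simp [pvHeapMin, pvLexLt]
  | cons x xs ih =>
    intro m
    by_cases hxm : pvLexLt x m = true
    · obtain ⟨ihm, ihp⟩ := ih x
      rw [show pvHeapMin m (x::xs) = pvHeapMin x xs by simp [pvHeapMin, hxm]]
      refine ⟨?_, ?_⟩
      · rcases List.mem_cons.1 ihm with h | h <;> simp [h]
      · intro y hy
        have hxr : pvLexLt x (pvHeapMin x xs) = false := ihp _ (by simp)
        rcases List.mem_cons.1 hy with rfl | hy'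
        · rw [Bool.eq_false_iff, Ne, pvLexLt_iff] at hxr ⊢
          rw [pvLexLt_iff] at hxm
          omega
        · exact ihp _ hy'
    · obtain ⟨ihm, ihp⟩ := ih m
      rw [show pvHeapMin m (x::xs) = pvHeapMin m xs by simp [pvHeapMin, hxm]]
      refine ⟨?_, ?_⟩
      · rcases List.mem_cons.1 ihm with h | h <;> simp [h]
      · intro y hy
        have hmr : pvLexLt m (pvHeapMin m xs) = false := ihp _ (by simp)
        rcases List.mem_cons.1 hy with rfl | hy'
        · exact hmr
        · rcases List.mem_cons.1 hy' with rfl | hy''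
          · rw [Bool.eq_false_iff, Ne, pvLexLt_iff] at hmr ⊢
            rw [pvLexLt_iff] at hxm
            omega
          · exact ihp _ (by simp [hy''])

lemma pvMin_unique {l : List (Int × Int)} {m₁ m₂ : Int × Int}
    (h₁ : m₁ ∈ l ∧ ∀ y ∈ l, pvLexLt y m₁ = false)
    (h₂ : m₂ ∈ l ∧ ∀ y ∈ l, pvLexLt y m₂ = false) : m₁ = m₂ := by
  have a1 := h₁.2 m₂ h₂.1
  have a2 := h₂.2 m₁ h₁.1
  rw [Bool.eq_false_iff, Ne, pvLexLt_iff] at a1 a2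
  have : m₁.1 = m₂.1 ∧ m₁.2 = m₂.2 := by omega
  exact Prod.ext this.1 this.2

lemma mem_pvPairs {loads : List Int} {y : Int × Int} :
    y ∈ pvPairs loads ↔ ∃ (k : Nat) (h : k < loads.length), y = (loads[k], (k : Int)) := by
  simp only [pvPairs, List.mem_map, PySem.List.mem_enumerate_iff]
  constructor
  · rintro ⟨p, ⟨k, hk, rfl⟩, rfl⟩; exact ⟨k, hk, by simp⟩
  · rintro ⟨k, hk, rfl⟩; exact ⟨((k:Int), loads[k]), ⟨k, hk, by simp⟩, rfl⟩

lemma pvPairs_replicate (n : Nat) :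
    pvPairs (List.replicate n (0 : Int)) = (PySem.List.pyRange 0 (n : Int) 1).map (fun i => ((0 : Int), i)) := by
  induction n with
  | zero => rfl
  | succ n ih =>
    rw [List.replicate_succ', pvPairs, PySem.List.enumerate_append, List.map_append]
    rw [show ((n + 1 : Nat) : Int) = (n : Int) + 1 by push_cast; ring]
    rw [PySem.List.pyRange_one_succ_right (by positivity), List.map_append]
    rw [← pvPairs, ih]
    simp [PySem.List.enumerate]

lemma heap0_eq (N : Int) (hN : 0 ≤ N) :
    (PySem.List.pyRange 0 N 1).map (fun i => ((0 : Int), i)) = pvPairs (List.replicate N.toNat 0) := by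
  rw [pvPairs_replicate, Int.toNat_of_nonneg hN]


lemma pvMinIdx_spec (loads : List Int) : ∀ (is : List Int) (b : Int),
    (∀ i ∈ is, b < i) → is.Pairwise (· < ·) →
    pvMinIdx loads b is ∈ b :: is ∧
      ∀ i ∈ b :: is, pvLoad loads (pvMinIdx loads b is) < pvLoad loads i ∨
        (pvLoad loads (pvMinIdx loads b is) = pvLoad loads i ∧ pvMinIdx loads b is ≤ i) := by
  intro is
  induction is with
  | nil =>
    intro b _ _
    refine ⟨by simp [pvMinIdx], ?_⟩
    intro i hi; simp at hi; subst hi; simp [pvMinIdx]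
  | cons i is ih =>
    intro b hlt hpw
    have hbi : b < i := hlt i (by simp)
    have hbis : ∀ k ∈ is, b < k := fun k hk => hlt k (by simp [hk])
    have hiis : ∀ k ∈ is, i < k := fun k hk => (List.pairwise_cons.1 hpw).1 k hk
    have hpw' : is.Pairwise (· < ·) := (List.pairwise_cons.1 hpw).2
    by_cases hc : pvLoad loads i < pvLoad loads b
    · obtain ⟨hm, hp⟩ := ih i hiis hpw'
      rw [show pvMinIdx loads b (i :: is) = pvMinIdx loads i is by simp [pvMinIdx, hc]]
      refine ⟨by rcases List.mem_cons.1 hm with h | h <;> simp [h], ?_⟩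
      intro k hk
      rcases List.mem_cons.1 hk with rfl | hk'
      · -- k = b
        have := hp i (by simp)
        omega
      · exact hp k hk'
    · obtain ⟨hm, hp⟩ := ih b hbis hpw'
      rw [show pvMinIdx loads b (i :: is) = pvMinIdx loads b is by simp [pvMinIdx, hc]]
      refine ⟨by rcases List.mem_cons.1 hm with h | h <;> simp [h], ?_⟩
      intro k hk
      rcases List.mem_cons.1 hk with rfl | hk'
      · exact hp k (by simp)
      · rcases List.mem_cons.1 hk' with rfl | hk''
        · -- k = i
          have := hp b (by simp)
          omega
        · exact hp k (by simp [hk''])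

lemma pvPairsFrom_set (u : Int) : ∀ (loads : List Int) (k : Nat) (hk : k < loads.length) (s : Int),
    List.Perm ((((PySem.List.enumerate loads s).map (fun p => (p.2, p.1))).erase (loads[k], s + (k : Int))) ++ [(u, s + (k : Int))])
      ((PySem.List.enumerate (loads.set k u) s).map (fun p => (p.2, p.1))) := by
  intro loads
  induction loads with
  | nil => intro k hk; simp at hk
  | cons v rest ih =>
    intro k hk s
    cases k with
    | zero =>
      simp only [List.getElem_cons_zero, Nat.cast_zero, add_zero, List.set_cons_zero,
        PySem.List.enumerate_cons, List.map_cons]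
      rw [List.erase_cons_head]
      exact List.perm_append_singleton _ _
    | succ k =>
      simp only [List.getElem_cons_succ, List.set_cons_succ, PySem.List.enumerate_cons, List.map_cons]
      rw [List.erase_cons_tail (by simp; omega), List.cons_append]
      refine List.Perm.cons _ ?_
      have := ih k (by simpa using hk) (s + 1)
      push_cast
      rw [show s + ((k : Int) + 1) = s + 1 + (k : Int) by ring]
      exact this

lemma pvPairs_set (u : Int) : ∀ (loads : List Int) (k : Nat) (hk : k < loads.length),
    List.Perm (((pvPairs loads).erase (loads[k], (k : Int))) ++ [(u, (k : Int))]) (pvPairs (loads.set k u)) := by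
  intro loads k hk
  have := pvPairsFrom_set u loads k hk 0
  simpa [pvPairs] using this


lemma length_pvPairs (loads : List Int) : (pvPairs loads).length = loads.length := by
  simp [pvPairs, PySem.List.length_enumerate]

lemma fold_rel (N : Int) (hN : 1 ≤ N) :
    ∀ (l : List (List (String × List Int))) (bA bB : List (List (List (String × List Int))))
      (heap : List (Int × Int)) (loads : List Int),
      bA = bB → heap.Perm (pvPairs loads) → loads.length = N.toNat →
      (l.foldl (fun st s =>
          match st.2 with
          | [] => st
          | x :: xs =>
            let m := pvHeapMin x xs
            (pvAppendAt st.1 m.2.toNat s, ((x :: xs).erase m) ++ [(m.1 + (s.length : Int), m.2)])) (bA, heap)).1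
      = (l.foldl (fun st s =>
          match PySem.List.pyRange 0 N 1 with
          | [] => st
          | i :: is =>
            let idx := pvMinIdx st.2 i is
            (pvAppendAt st.1 idx.toNat s, st.2.set idx.toNat (pvLoad st.2 idx + (s.length : Int)))) (bB, loads)).1 := by
  have hr : PySem.List.pyRange 0 N 1 = 0 :: PySem.List.pyRange 1 N 1 := by
    rw [PySem.List.pyRange_one_cons (by omega : (0:Int) < N)]
    norm_num
  have hg : (fun (st : List (List (List (String × List Int))) × List Int) (s : List (String × List Int)) =>
        match PySem.List.pyRange 0 N 1 with
        | [] => st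
        | i :: is =>
          let idx := pvMinIdx st.2 i is
          (pvAppendAt st.1 idx.toNat s, st.2.set idx.toNat (pvLoad st.2 idx + (s.length : Int))))
      = (fun st s =>
          (pvAppendAt st.1 (pvMinIdx st.2 0 (PySem.List.pyRange 1 N 1)).toNat s,
           st.2.set (pvMinIdx st.2 0 (PySem.List.pyRange 1 N 1)).toNat
             (pvLoad st.2 (pvMinIdx st.2 0 (PySem.List.pyRange 1 N 1)) + (s.length : Int)))) := by
    funext st s
    rw [hr]
  intro l
  simp only [hg]
  induction l with
  | nil => intro bA bB heap loads hb _ _; simpa using hb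
  | cons s t ih =>
    intro bA bB heap loads hb hperm hlen
    have hn1 : 1 ≤ loads.length := by omega
    have hheaplen : heap.length = loads.length := by
      rw [hperm.length_eq, length_pvPairs]
    obtain ⟨x, xs, hx⟩ : ∃ x xs, heap = x :: xs := by
      cases heap with
      | nil => simp at hheaplen; omega
      | cons a b => exact ⟨a, b, rfl⟩
    subst hx
    -- B's chosen index
    have hspec := pvMinIdx_spec loads (PySem.List.pyRange 1 N 1) 0
      (fun i hi => by have := (PySem.List.mem_pyRange_one.1 hi).1; omega)
      (PySem.List.pairwise_lt_pyRange_one 1 N)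
    set j := pvMinIdx loads 0 (PySem.List.pyRange 1 N 1) with hj
    have hjmem : (0:Int) ≤ j ∧ j < N := by
      rcases List.mem_cons.1 hspec.1 with h | h
      · omega
      · have := PySem.List.mem_pyRange_one.1 h; omega
    have hkN : j.toNat < loads.length := by omega
    have hjk : (j.toNat : Int) = j := Int.toNat_of_nonneg hjmem.1
    have hloadj : pvLoad loads j = loads[j.toNat] := by
      rw [pvLoad, PySem.List.pyGet?_of_nonneg loads hjmem.1, List.getElem?_eq_getElem hkN, Option.getD_some]
    -- (loads[j], j) is the lex-min of pvPairs loads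
    have hmin' : (loads[j.toNat], j) ∈ pvPairs loads ∧
        ∀ y ∈ pvPairs loads, pvLexLt y (loads[j.toNat], j) = false := by
      constructor
      · exact mem_pvPairs.2 ⟨j.toNat, hkN, by rw [hjk]⟩
      · intro y hy
        obtain ⟨k', hk', rfl⟩ := mem_pvPairs.1 hy
        have hk'mem : ((k' : Int)) ∈ (0:Int) :: PySem.List.pyRange 1 N 1 := by
          by_cases h0 : k' = 0
          · subst h0; simp
          · exact List.mem_cons.2 (Or.inr (PySem.List.mem_pyRange_one.2 ⟨by omega, by omega⟩))
        have hrel := hspec.2 (k' : Int) hk'mem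
        have hloadk' : pvLoad loads (k' : Int) = loads[k'] := by
          rw [pvLoad, PySem.List.pyGet?_natCast loads k', List.getElem?_eq_getElem hk', Option.getD_some]
        rw [hloadj, hloadk'] at hrel
        rw [Bool.eq_false_iff, Ne, pvLexLt_iff]
        simp only []
        omega
    -- the heap pop yields the same pair
    have hminA : pvHeapMin x xs ∈ pvPairs loads ∧
        ∀ y ∈ pvPairs loads, pvLexLt y (pvHeapMin x xs) = false := by
      obtain ⟨h1, h2⟩ := pvHeapMin_isMin xs x
      exact ⟨hperm.mem_iff.1 h1, fun y hy => h2 y (hperm.mem_iff.2 hy)⟩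
    have hmeq : pvHeapMin x xs = (loads[j.toNat], j) := pvMin_unique hminA hmin'
    rw [List.foldl_cons, List.foldl_cons]
    simp only [hmeq]
    apply ih
    · rw [hb]
    · show List.Perm ((x :: xs).erase (loads[j.toNat], j) ++ [(loads[j.toNat] + (s.length : Int), j)]) _
      rw [← hj, hloadj]
      refine List.Perm.trans ?_ (pvPairs_set _ loads j.toNat hkN)
      rw [hjk]
      exact (hperm.erase _).append_right _
    · simp [hlen]

theorem redistribute_batches_spec : Claim_equal_redistribute_batches := by
  intro all_elements N _ hPre
  unfold Spec_redistribute_batches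
  rcases hPre with ⟨hcase, -⟩
  rcases hcase with rfl | hN
  · rfl
  · simp only [redistribute_batches, redistribute_batches_alt]
    refine fold_rel N hN (PySem.List.sorted all_elements pvKey true) _ _ _ _ rfl ?_ (by simp)
    rw [heap0_eq N (by omega)]
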